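-- pv_equiv track=rewrite | github.com/bouthilx/compute-forecast-framework | compute_forecast/pipeline/pdf_acquisition/discovery/sources/unpaywall_client.py | _extract_oa_urls
-- ===== SOURCE A (Python) =====
-- from typing import List, Dict, Any
--
-- def _extract_oa_urls(oa_locations: List[Dict[str, Any]]) -> List[str]:
--     """Extract and prioritize open access URLs from Unpaywall data.
--
--     Args:
--         oa_locations: List of OA location dicts from Unpaywall
--
--     Returns:
--         List of URLs ordered by preference (publisher first, then repository)
--     """
--     if not oa_locations:
--         return []
--
--     publisher_urls = []
--     repository_urls = []
--
--     for location in oa_locations: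
--         url = location.get("url")
--         if not url:
--             continue
--
--         host_type = location.get("host_type", "").lower()
--         if host_type == "publisher":
--             publisher_urls.append(url)
--         elif host_type == "repository":
--             repository_urls.append(url)
--         else:
--             # Unknown type, add to repository list
--             repository_urls.append(url)
--
--     # Prioritize publisher versions over repository versions
--     return publisher_urls + repository_urls
-- ===== SOURCE B (Python) =====
-- def _extract_oa_urls(oa_locations):
--     """Extract and prioritize open access URLs: publisher-hosted first,
--     then repository/unknown, via a single stable sort on a preference key."""
--     def pref(location):
--         return 0 if location.get("host_type", "").lower() == "publisher" else 1
--
--     keyed = [(pref(location), location.get("url"))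
--              for location in oa_locations if location.get("url")]
--     return [url for _, url in sorted(keyed, key=lambda t: t[0])]
-- ===== Notes on version B (the rewrite author's own statement) =====
-- stated objective: idiomatic
-- what changed: Replaces the explicit two-list partition with concatenation by building (preference-key, url) pairs in one comprehension and doing a single stable sort on the key, relying on sort stability for within-group order.
import Mathlib
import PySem

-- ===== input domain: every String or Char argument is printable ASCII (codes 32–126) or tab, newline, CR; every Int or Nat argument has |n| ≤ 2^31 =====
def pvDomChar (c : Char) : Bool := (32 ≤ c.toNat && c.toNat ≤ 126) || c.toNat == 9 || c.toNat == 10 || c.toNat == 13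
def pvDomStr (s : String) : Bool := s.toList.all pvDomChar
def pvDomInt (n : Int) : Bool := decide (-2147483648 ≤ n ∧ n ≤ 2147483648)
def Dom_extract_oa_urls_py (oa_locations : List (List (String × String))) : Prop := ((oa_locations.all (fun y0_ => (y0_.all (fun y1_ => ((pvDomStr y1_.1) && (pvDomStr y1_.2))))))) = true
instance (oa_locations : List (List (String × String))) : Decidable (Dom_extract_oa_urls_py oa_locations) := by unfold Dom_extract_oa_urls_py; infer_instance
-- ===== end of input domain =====

-- B replaces A's explicit two-list partition + concatenation with one stable sort on a 0/1 preference key (idiomatic; same results).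


-- ===== PORT A =====
-- literal port: early [] return, one loop appending to two lists, then publisher_urls ++ repository_urls
def extract_oa_urls_py (oa_locations : List (List (String × String))) : List String :=
  if oa_locations = [] then []
  else
    let acc := oa_locations.foldl (fun (acc : List String × List String) location =>
      match (PySem.Dict.ofList location).get? "url" with
      | none => acc                                -- 'if not url: continue'
      | some url =>
        if url = "" then acc                       -- 'if not url: continue'
        else
          let host_type := PySem.Str.lower ((PySem.Dict.ofList location).getD "host_type" "")
          if host_type = "publisher" then (acc.1 ++ [url], acc.2)
          else if host_type = "repository" then (acc.1, acc.2 ++ [url])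
          else (acc.1, acc.2 ++ [url]))            -- unknown type: repository list
      ([], [])
    acc.1 ++ acc.2

-- ===== PORT B =====
-- B's preference key: 0 for publisher-hosted, 1 otherwise
def prefKey (location : List (String × String)) : Int :=
  if PySem.Str.lower ((PySem.Dict.ofList location).getD "host_type" "") = "publisher" then 0 else 1

-- comprehension building (key, url) pairs, skipping falsy urls
def keyedOf (oa_locations : List (List (String × String))) : List (Int × String) :=
  oa_locations.filterMap (fun location =>
    match (PySem.Dict.ofList location).get? "url" with
    | none => none
    | some url => if url = "" then none else some (prefKey location, url))

def extract_oa_urls_py_alt (oa_locations : List (List (String × String))) : List String :=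
  (PySem.List.sorted (keyedOf oa_locations) (fun t => t.1) false).map (fun t => t.2)

-- ===== PRECONDITION & SPEC =====
def Spec_extract_oa_urls_py (oa_locations : List (List (String × String))) (out : List String) : Prop := out = extract_oa_urls_py_alt oa_locations
instance (oa_locations : List (List (String × String))) (out : List String) : Decidable (Spec_extract_oa_urls_py oa_locations out) := by unfold Spec_extract_oa_urls_py; infer_instance

-- ===== CLAIM (what is proved, stated in full; the proofs are below) =====
def Claim_equal_extract_oa_urls_py : Prop := ∀ (oa_locations : List (List (String × String))), Dom_extract_oa_urls_py oa_locations → Spec_extract_oa_urls_py oa_locations (extract_oa_urls_py oa_locations)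

-- ===== LEMMAS AND PROOFS =====

-- the comparator PySem.List.sorted uses for key (·.1) on Int × String
def bf : Int × String → Int × String → Bool := fun a b => decide (a.1 < b.1)

-- every key produced by keyedOf is 0 or 1
theorem keyedOf_keys (oa_locations : List (List (String × String))) :
    ∀ t ∈ keyedOf oa_locations, t.1 = 0 ∨ t.1 = 1 := by
  intro t ht
  rcases List.mem_filterMap.mp ht with ⟨loc, _, h⟩
  revert h
  cases (PySem.Dict.ofList loc).get? "url" with
  | none => simp
  | some url =>
    intro h
    by_cases h1 : url = ""
    · simp [h1] at h
    · rw [show (match some url with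
          | none => none
          | some url => if url = "" then none else some (prefKey loc, url))
          = some (prefKey loc, url) by simp [h1]] at h
      cases h
      unfold prefKey; split_ifs <;> simp

-- inserting a key-0 element into (zeros ++ ones) lands between the groups (stability)
theorem insertBy_zero (A B : List (Int × String)) (x : Int × String) (hx : x.1 = 0)
    (hA : ∀ t ∈ A, t.1 = 0) (hB : ∀ t ∈ B, t.1 = 1) :
    PySem.List.insertBy bf x (A ++ B) = A ++ x :: B := by
  induction A with
  | nil =>
    cases B with
    | nil => rfl
    | cons b bs =>
      have : bf x b = true := by
        simp [bf, hx, hB b (by simp)]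
      simp [PySem.List.insertBy, this]
  | cons a A ih =>
    have : bf x a = false := by
      simp [bf, hx, hA a (by simp)]
    simp only [List.cons_append, PySem.List.insertBy, this, Bool.false_eq_true, if_false]
    rw [ih (fun t ht => hA t (by simp [ht]))]

-- inserting a key-1 element appends at the end
theorem insertBy_one (L : List (Int × String)) (x : Int × String) (hx : x.1 = 1)
    (hL : ∀ t ∈ L, t.1 = 0 ∨ t.1 = 1) :
    PySem.List.insertBy bf x L = L ++ [x] := by
  apply PySem.List.insertBy_of_forall_not_before
  intro y hy
  rcases hL y hy with h | h <;> simp [bf, hx, h]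

-- the insertion-sort fold with a (zeros ++ ones) accumulator is the two filters
theorem foldl_insertBy_partition :
    ∀ (l A B : List (Int × String)), (∀ t ∈ A, t.1 = 0) → (∀ t ∈ B, t.1 = 1) →
    (∀ t ∈ l, t.1 = 0 ∨ t.1 = 1) →
    l.foldl (fun acc x => PySem.List.insertBy bf x acc) (A ++ B)
      = (A ++ l.filter (fun t => t.1 == 0)) ++ (B ++ l.filter (fun t => !(t.1 == 0))) := by
  intro l
  induction l with
  | nil => intro A B _ _ _; simp
  | cons x l ih =>
    intro A B hA hB hl
    rcases hl x (by simp) with hx | hx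
    · simp only [List.foldl_cons]
      rw [insertBy_zero A B x hx hA hB]
      have : A ++ x :: B = (A ++ [x]) ++ B := by simp
      rw [this, ih (A ++ [x]) B
        (by intro t ht; rcases List.mem_append.mp ht with h | h
            · exact hA t h
            · simp at h; subst h; exact hx)
        hB (fun t ht => hl t (by simp [ht]))]
      simp [hx]
    · simp only [List.foldl_cons]
      rw [insertBy_one (A ++ B) x hx
        (by intro t ht; rcases List.mem_append.mp ht with h | h
            · exact Or.inl (hA t h)
            · exact Or.inr (hB t h))]
      have : (A ++ B) ++ [x] = A ++ (B ++ [x]) := by simp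
      rw [this, ih A (B ++ [x]) hA
        (by intro t ht; rcases List.mem_append.mp ht with h | h
            · exact hB t h
            · simp at h; subst h; exact hx)
        (fun t ht => hl t (by simp [ht]))]
      simp [hx]

-- sorted on a 0/1 key is exactly the stable partition
theorem sorted_keyed (l : List (Int × String)) (hl : ∀ t ∈ l, t.1 = 0 ∨ t.1 = 1) :
    PySem.List.sorted l (fun t => t.1) false
      = l.filter (fun t => t.1 == 0) ++ l.filter (fun t => !(t.1 == 0)) := by
  have := foldl_insertBy_partition l [] [] (by simp) (by simp) hl
  simpa [PySem.List.sorted, bf] using this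

-- A's loop state equals B's two filters (projected to urls)
theorem foldA_eq :
    ∀ (oa : List (List (String × String))) (P R : List String),
    oa.foldl (fun (acc : List String × List String) location =>
      match (PySem.Dict.ofList location).get? "url" with
      | none => acc
      | some url =>
        if url = "" then acc
        else
          let host_type := PySem.Str.lower ((PySem.Dict.ofList location).getD "host_type" "")
          if host_type = "publisher" then (acc.1 ++ [url], acc.2)
          else if host_type = "repository" then (acc.1, acc.2 ++ [url])
          else (acc.1, acc.2 ++ [url])) (P, R)
      = (P ++ ((keyedOf oa).filter (fun t => t.1 == 0)).map (fun t => t.2),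
         R ++ ((keyedOf oa).filter (fun t => !(t.1 == 0))).map (fun t => t.2)) := by
  intro oa
  induction oa with
  | nil => intro P R; simp [keyedOf]
  | cons loc oa ih =>
    intro P R
    simp only [List.foldl_cons, keyedOf, List.filterMap_cons]
    cases hg : (PySem.Dict.ofList loc).get? "url" with
    | none => simpa [keyedOf] using ih P R
    | some url =>
      by_cases hu : url = ""
      · simpa [keyedOf, hu] using ih P R
      · simp only [hu, if_false]
        by_cases hp : PySem.Str.lower ((PySem.Dict.ofList loc).getD "host_type" "") = "publisher"
        · have hk : prefKey loc = 0 := by simp [prefKey, hp]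
          simp only [hp, if_true]
          rw [ih (P ++ [url]) R]
          simp [keyedOf, hk]
        · have hk : prefKey loc = 1 := by simp [prefKey, hp]
          simp only [hp, if_false]
          by_cases hr : PySem.Str.lower ((PySem.Dict.ofList loc).getD "host_type" "") = "repository" <;>
            · simp only [hr, if_true, if_false]
              rw [ih P (R ++ [url])]
              simp [keyedOf, hk]

-- ===== VERDICT (by name: the statement is the Claim_ definition above) =====
theorem extract_oa_urls_py_spec : Claim_equal_extract_oa_urls_py := by
  intro oa _
  show extract_oa_urls_py oa = extract_oa_urls_py_alt oa
  unfold extract_oa_urls_py extract_oa_urls_py_alt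
  rw [sorted_keyed (keyedOf oa) (keyedOf_keys oa)]
  by_cases h : oa = []
  · subst h; simp [keyedOf]
  · simp only [h, if_false]
    rw [foldA_eq oa [] []]
    simp
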